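-- pv_equiv track=rewrite | github.com/ArayikKarapetyan/ROSALIND | 036) k-Mer Composition/python_biopython.py | kmer_composition_biopython
-- ===== SOURCE A (Python) =====
-- from itertools import product
--
-- def kmer_composition_biopython(seq, k=4):
--     """Calculate k-mer composition using BioPython."""
--     # Generate all k-mers in lexicographic order
--     alphabet = ['A', 'C', 'G', 'T']
--     all_kmers = [''.join(p) for p in product(alphabet, repeat=k)]
--
--     # Initialize count dictionary
--     kmer_counts = {kmer: 0 for kmer in all_kmers}
--
--     # Count k-mers
--     seq_str = str(seq)
--     for i in range(len(seq_str) - k + 1):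
--         kmer = seq_str[i:i+k]
--         if kmer in kmer_counts:
--             kmer_counts[kmer] += 1
--
--     # Return counts in lexicographic order
--     return [kmer_counts[kmer] for kmer in all_kmers]
-- ===== SOURCE B (Python) =====
-- def kmer_composition_biopython(seq, k=4):
--     """Calculate k-mer composition via base-4 encoding with a rolling index."""
--     s = str(seq)
--     n = len(s)
--     if k == 0:
--         return [n + 1]
--     code = {'A': 0, 'C': 1, 'G': 2, 'T': 3}
--     counts = {}  # sparse: base-4 index of a window -> its count
--     base = 4 ** (k - 1)
--     idx = 0
--     run = 0  # length of the current run of A/C/G/T characters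
--     for ch in s:
--         c = code.get(ch)
--         if c is None:
--             idx = 0
--             run = 0
--         else:
--             idx = (idx % base) * 4 + c
--             run += 1
--             if run >= k:
--                 counts[idx] = counts.get(idx, 0) + 1
--     return [counts.get(j, 0) for j in range(4 ** k)]
-- ===== Notes on version B (the rewrite author's own statement) =====
-- stated objective: alternative
-- what changed: Replaces the generation of all 4^k k-mer strings and per-window dict string lookups by a sparse counts dict keyed by a rolling base-4 encoding of the current window, updated in O(1) per character, with the output list read off the dict over range(4**k).
import Mathlib
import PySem

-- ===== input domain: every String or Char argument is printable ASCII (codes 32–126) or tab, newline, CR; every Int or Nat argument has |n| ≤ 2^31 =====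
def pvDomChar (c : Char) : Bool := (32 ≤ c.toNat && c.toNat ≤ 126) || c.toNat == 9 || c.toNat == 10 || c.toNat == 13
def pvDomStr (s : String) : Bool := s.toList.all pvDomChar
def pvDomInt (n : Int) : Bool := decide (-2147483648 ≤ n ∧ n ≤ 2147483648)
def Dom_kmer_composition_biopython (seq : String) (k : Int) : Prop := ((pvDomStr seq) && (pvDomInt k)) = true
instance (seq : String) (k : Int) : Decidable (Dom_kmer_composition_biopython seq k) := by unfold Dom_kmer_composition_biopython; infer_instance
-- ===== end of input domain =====

-- B replaces A's generation of all 4^k k-mer strings and its per-window dict lookups by a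
-- counts array indexed by a rolling base-4 window encoding (objective: alternative algorithm).

-- ===== PORT A =====
-- itertools.product(['A','C','G','T'], repeat=K): tuples as List Char, in product order
def kmerProduct (alphabet : List Char) : Nat → List (List Char)
  | 0 => [[]]
  | n + 1 => alphabet.flatMap (fun a => (kmerProduct alphabet n).map (fun p => a :: p))

def kmer_composition_biopython (seq : String) (k : Int) : List Int :=
  let alphabet : List Char := ['A', 'C', 'G', 'T']
  -- ''.join over the product tuples: k-mer strings kept as List Char (their code points);
  -- product(repeat=k) raises ValueError for k < 0 (outside Pre_), so k.toNat is exact on Pre_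
  let all_kmers : List (List Char) := kmerProduct alphabet k.toNat
  let kmer_counts : PySem.Dict (List Char) Int :=
    all_kmers.foldl (fun d w => d.insert w 0) PySem.Dict.empty
  let s := seq.toList
  let d := (PySem.List.pyRange 0 ((s.length : Int) - k + 1) 1).foldl
    (fun d i =>
      let kmer := PySem.List.slice s (some i) (some (i + k))
      if d.contains kmer then d.modify kmer 0 (· + 1) else d) kmer_counts
  -- kmer_counts[kmer]: every kmer of all_kmers is a dict key, so d[kmer] = d.getD kmer 0
  all_kmers.map (fun w => d.getD w 0)

-- ===== PORT B =====
def codeB (c : Char) : Option Nat :=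
  if c = 'A' then some 0 else if c = 'C' then some 1
  else if c = 'G' then some 2 else if c = 'T' then some 3 else none

def kmer_composition_biopython_alt (seq : String) (k : Int) : List Int :=
  let s := seq.toList
  let n := s.length
  if k = 0 then [(n : Int) + 1]
  else
    -- 4 ** (k-1) is a float for k < 0 and the final range raises there (outside Pre_),
    -- so k.toNat is exact here; base = 4^(K-1); counts is a sparse dict index -> count
    let K := k.toNat
    let step := fun (st : PySem.Dict Nat Int × Nat × Nat) (ch : Char) =>
      match codeB ch with
      | none => (st.1, 0, 0)
      | some c =>
        let idx := (st.2.1 % 4 ^ (K - 1)) * 4 + c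
        let run := st.2.2 + 1
        if K ≤ run then (st.1.insert idx (st.1.getD idx 0 + 1), idx, run) else (st.1, idx, run)
    let r := s.foldl step (PySem.Dict.empty, 0, 0)
    (List.range (4 ^ K)).map (fun j => r.1.getD j 0)

-- ===== PRECONDITION & SPEC =====
-- Pre_ excludes exactly k < 0, on which A raises ValueError (itertools.product with repeat < 0).
def Pre_kmer_composition_biopython (seq : String) (k : Int) : Prop := 0 ≤ k
instance (seq : String) (k : Int) : Decidable (Pre_kmer_composition_biopython seq k) := by
  unfold Pre_kmer_composition_biopython; infer_instance

def pvWitness_kmer_composition_biopython : String × Int := ("ACGTAC", 2)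

def Spec_kmer_composition_biopython (seq : String) (k : Int) (out : List Int) : Prop := out = kmer_composition_biopython_alt seq k
instance (seq : String) (k : Int) (out : List Int) : Decidable (Spec_kmer_composition_biopython seq k out) := by unfold Spec_kmer_composition_biopython; infer_instance

-- ===== CLAIM (what is proved, stated in full; the proofs are below) =====
def Claim_equal_kmer_composition_biopython : Prop := ∀ (seq : String) (k : Int), Dom_kmer_composition_biopython seq k → Pre_kmer_composition_biopython seq k → Spec_kmer_composition_biopython seq k (kmer_composition_biopython seq k)

-- ===== LEMMAS AND PROOFS =====

-- base-4 encoding/decoding of k-mers, windows and the maximal valid suffix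
def isACGT (c : Char) : Bool := (codeB c).isSome
def cval (c : Char) : Nat := (codeB c).getD 0
def enc (w : List Char) : Nat := w.foldl (fun a c => a * 4 + cval c) 0
def dec : Nat → Nat → List Char
  | 0, _ => []
  | K + 1, j => (['A', 'C', 'G', 'T'].getD (j / 4 ^ K) 'A') :: dec K (j % 4 ^ K)
def validB (w : List Char) : Bool := w.all isACGT
def wnd (K : Nat) (p : List Char) : List (List Char) :=
  (List.range (p.length + 1 - K)).map (fun i => (p.drop i).take K)
def vsuf (p : List Char) : List Char := (p.reverse.takeWhile isACGT).reverse

theorem cval_lt_four (c : Char) : cval c < 4 := by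
  unfold cval codeB; split_ifs <;> simp

theorem enc_foldl (w : List Char) (y : Nat) :
    w.foldl (fun a c => a * 4 + cval c) y = y * 4 ^ w.length + enc w := by
  induction w generalizing y with
  | nil => simp [enc]
  | cons c t ih =>
    simp only [List.foldl_cons, enc]
    rw [ih (y * 4 + cval c), ih (0 * 4 + cval c)]
    simp [List.length_cons, pow_succ]
    ring

theorem enc_append (u v : List Char) : enc (u ++ v) = enc u * 4 ^ v.length + enc v := by
  unfold enc
  rw [List.foldl_append, enc_foldl]; rfl

theorem enc_lt (w : List Char) : enc w < 4 ^ w.length := by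
  induction w with
  | nil => simp [enc]
  | cons c t ih =>
    have : enc (c :: t) = cval c * 4 ^ t.length + enc t := by
      have := enc_append [c] t
      simpa [enc] using this
    rw [this]
    have hc := cval_lt_four c
    have : cval c * 4 ^ t.length + enc t < (cval c + 1) * 4 ^ t.length := by
      rw [add_mul, one_mul]; omega
    calc cval c * 4 ^ t.length + enc t < (cval c + 1) * 4 ^ t.length := this
      _ ≤ 4 * 4 ^ t.length := by
          apply Nat.mul_le_mul_right; omega
      _ = 4 ^ (c :: t).length := by rw [List.length_cons, pow_succ]; ring

theorem dec_length (K j : Nat) : (dec K j).length = K := by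
  induction K generalizing j with
  | zero => simp [dec]
  | succ n ih => simp [dec, ih]

theorem dec_valid (K j : Nat) (h : j < 4 ^ K) : validB (dec K j) = true := by
  induction K generalizing j with
  | zero => simp [dec, validB]
  | succ n ih =>
    have hdiv : j / 4 ^ n < 4 := by
      have h2 : (4:Nat) ^ (n+1) = 4 ^ n * 4 := by rw [pow_succ]
      exact Nat.div_lt_of_lt_mul (by omega)
    have hmod : j % 4 ^ n < 4 ^ n := Nat.mod_lt _ (Nat.pos_of_neZero _)
    simp only [dec, validB, List.all_cons]
    rw [Bool.and_eq_true]
    refine ⟨?_, ih _ hmod⟩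
    interval_cases h : (j / 4 ^ n) <;> decide


theorem enc_cons (c : Char) (t : List Char) : enc (c :: t) = cval c * 4 ^ t.length + enc t := by
  have := enc_append [c] t
  simpa [enc] using this

theorem enc_dec (K j : Nat) (h : j < 4 ^ K) : enc (dec K j) = j := by
  induction K generalizing j with
  | zero => simp [dec, enc]; omega
  | succ n ih =>
    have hp : 0 < (4:Nat) ^ n := Nat.pos_of_neZero _
    have hmod : j % 4 ^ n < 4 ^ n := Nat.mod_lt _ hp
    have hdiv : j / 4 ^ n < 4 := by
      have h2 : (4:Nat) ^ (n+1) = 4 ^ n * 4 := by rw [pow_succ]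
      exact Nat.div_lt_of_lt_mul (by omega)
    rw [dec, enc_cons, dec_length, ih _ hmod]
    have hc : cval (['A', 'C', 'G', 'T'].getD (j / 4 ^ n) 'A') = j / 4 ^ n := by
      interval_cases h : (j / 4 ^ n) <;> decide
    rw [hc]
    have := Nat.div_add_mod j (4 ^ n)
    rw [Nat.mul_comm] at this
    omega

theorem getD_cval (c : Char) (h : isACGT c = true) :
    (['A', 'C', 'G', 'T'].getD (cval c) 'A') = c := by
  unfold isACGT codeB at h
  unfold cval codeB
  split_ifs at h ⊢ <;> simp_all

theorem dec_enc (w : List Char) (h : validB w = true) : dec w.length (enc w) = w := by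
  induction w with
  | nil => simp [dec]
  | cons c t ih =>
    simp only [validB, List.all_cons, Bool.and_eq_true] at h
    rw [List.length_cons, dec, enc_cons]
    have hlt : enc t < 4 ^ t.length := enc_lt t
    have hdiv : (cval c * 4 ^ t.length + enc t) / 4 ^ t.length = cval c := by
      rw [Nat.mul_comm, Nat.mul_add_div (Nat.pos_of_neZero _), Nat.div_eq_of_lt hlt]; omega
    have hmod : (cval c * 4 ^ t.length + enc t) % 4 ^ t.length = enc t := by
      rw [Nat.mul_comm, Nat.mul_add_mod, Nat.mod_eq_of_lt hlt]
    rw [hdiv, hmod, ih h.2, getD_cval c h.1]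

theorem range_mul (a b : Nat) :
    List.range (a * b) = (List.range a).flatMap (fun i => (List.range b).map (fun j => i * b + j)) := by
  induction a with
  | zero => simp
  | succ n ih =>
    rw [Nat.succ_mul, List.range_add, ih, List.range_succ, List.flatMap_append]
    simp

theorem kmerProduct_eq (K : Nat) :
    kmerProduct ['A', 'C', 'G', 'T'] K = (List.range (4 ^ K)).map (dec K) := by
  induction K with
  | zero => simp [kmerProduct, dec]
  | succ n ih =>
    have h4 : (4:Nat) ^ (n+1) = 4 * 4 ^ n := by rw [pow_succ]; ring
    rw [kmerProduct, ih, h4, range_mul]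
    have hblk : ∀ (a : Nat) (ch : Char), a < 4 → (['A','C','G','T'].getD a 'A') = ch →
        (List.map (dec n) (List.range (4 ^ n))).map (ch :: ·)
          = (List.map (fun j => a * 4 ^ n + j) (List.range (4 ^ n))).map (dec (n+1)) := by
      intro a ch ha hch
      rw [List.map_map, List.map_map]
      apply List.map_congr_left
      intro j hj
      rw [List.mem_range] at hj
      have hdiv : (a * 4 ^ n + j) / 4 ^ n = a := by
        rw [Nat.mul_comm a, Nat.mul_add_div (Nat.pos_of_neZero _), Nat.div_eq_of_lt hj]; omega
      have hmod : (a * 4 ^ n + j) % 4 ^ n = j := by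
        rw [Nat.mul_comm a, Nat.mul_add_mod, Nat.mod_eq_of_lt hj]
      simp [Function.comp, dec, hdiv, hmod, ← hch, List.getD]
    have r4 : List.range 4 = [0,1,2,3] := rfl
    rw [r4]
    simp only [List.flatMap_cons, List.flatMap_nil, List.append_nil, List.map_append]
    rw [← hblk 0 'A' (by omega) rfl, ← hblk 1 'C' (by omega) rfl,
        ← hblk 2 'G' (by omega) rfl, ← hblk 3 'T' (by omega) rfl]

theorem mem_kmerProduct (K : Nat) (w : List Char) :
    w ∈ kmerProduct ['A', 'C', 'G', 'T'] K ↔ w.length = K ∧ validB w = true := by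
  rw [kmerProduct_eq]
  constructor
  · intro hw
    rw [List.mem_map] at hw
    obtain ⟨j, hj, rfl⟩ := hw
    rw [List.mem_range] at hj
    exact ⟨dec_length K j, dec_valid K j hj⟩
  · rintro ⟨rfl, hv⟩
    rw [List.mem_map]
    exact ⟨enc w, List.mem_range.mpr (enc_lt w), dec_enc w hv⟩

theorem mod_step (K x c : Nat) (hK : 1 ≤ K) (hc : c < 4) :
    (x % 4 ^ K % 4 ^ (K - 1)) * 4 + c = (x * 4 + c) % 4 ^ K := by
  have hd : (4:Nat) ^ (K-1) ∣ 4 ^ K := pow_dvd_pow 4 (by omega)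
  rw [Nat.mod_mod_of_dvd _ hd]
  have hKe : K = (K - 1) + 1 := by omega
  set m := (4:Nat) ^ (K - 1) with hm
  have h4K : (4:Nat) ^ K = m * 4 := by rw [hKe, pow_succ]
  rw [h4K]
  have hx := Nat.div_add_mod x m
  have hmpos : 0 < m := Nat.pos_of_neZero _
  have hlt : (x % m) * 4 + c < m * 4 := by
    have : x % m < m := Nat.mod_lt _ hmpos
    omega
  calc (x % m) * 4 + c = ((x / m) * (m * 4) + ((x % m) * 4 + c)) % (m * 4) := by
        rw [Nat.mul_add_mod' , Nat.mod_eq_of_lt hlt]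
    _ = (x * 4 + c) % (m * 4) := by
        have hxe : (x / m) * (m * 4) + ((x % m) * 4 + c) = x * 4 + c := by
          conv_rhs => rw [← hx]
          ring
        rw [hxe]

-- dict lemmas
theorem dict_init_contains (l : List (List Char)) (d : PySem.Dict (List Char) Int) (v : List Char) :
    ((l.foldl (fun d w => d.insert w 0) d).contains v) = (d.contains v || l.contains v) := by
  induction l generalizing d with
  | nil => simp
  | cons w t ih =>
    rw [List.foldl_cons, ih, PySem.Dict.contains_insert]
    simp only [List.contains_cons]
    cases hvw : (v == w) <;> cases d.contains v <;> simp_all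

theorem dict_init_getD (l : List (List Char)) (d : PySem.Dict (List Char) Int) (v : List Char)
    (h : ∀ y, d.getD y 0 = 0) : (l.foldl (fun d w => d.insert w 0) d).getD v 0 = 0 := by
  induction l generalizing d with
  | nil => exact h v
  | cons w t ih =>
    rw [List.foldl_cons]
    apply ih
    intro y
    rw [PySem.Dict.getD_insert]
    split <;> simp [h]

theorem dict_count_loop (l : List (List Char)) (d : PySem.Dict (List Char) Int) (v : List Char) :
    (∀ y, (l.foldl (fun d x => if d.contains x then d.modify x 0 (· + 1) else d) d).contains y = d.contains y) ∧
    (d.contains v = true →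
      (l.foldl (fun d x => if d.contains x then d.modify x 0 (· + 1) else d) d).getD v 0
        = d.getD v 0 + ((l.filter (fun x => d.contains x)).count v : Int)) := by
  induction l generalizing d with
  | nil => simp
  | cons w t ih =>
    have hcw : ∀ y, (if d.contains w = true then d.modify w 0 (· + 1) else d).contains y = d.contains y := by
      intro y
      split
      · rename_i hw
        rw [PySem.Dict.contains_modify]
        rcases hyw : (y == w) with _ | _
        · rw [Bool.false_or]
        · rw [Bool.true_or, eq_of_beq hyw, hw]
      · rfl
    constructor
    · intro y
      rw [List.foldl_cons, (ih _).1 y, hcw y]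
    · intro hv
      rw [List.foldl_cons]
      rw [(ih _).2 (by rw [hcw v]; exact hv)]
      rw [List.filter_congr (fun x _ => hcw x)]
      rw [List.filter_cons]
      by_cases hw : d.contains w = true
      · simp only [if_pos hw]
        rw [List.count_cons]
        by_cases hwv : w = v
        · subst hwv
          rw [PySem.Dict.getD_modify, if_pos rfl]
          simp only [beq_self_eq_true, if_true]
          push_cast
          ring
        · rw [PySem.Dict.getD_modify, if_neg (Ne.symm hwv)]
          simp only [show (w == v) = false from by simp [hwv]]
          simp
      · simp only [Bool.not_eq_true] at hw
        rw [hw]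
        simp

theorem wnd_length_mem (K : Nat) (p x : List Char) (hx : x ∈ wnd K p) : x.length = K := by
  unfold wnd at hx
  rw [List.mem_map] at hx
  obtain ⟨i, hi, rfl⟩ := hx
  rw [List.mem_range] at hi
  rw [List.length_take, List.length_drop]
  omega

theorem wnd_snoc (K : Nat) (p : List Char) (c : Char) (hK : K ≤ p.length + 1) :
    wnd K (p ++ [c]) = wnd K p ++ [(p ++ [c]).drop (p.length + 1 - K)] := by
  unfold wnd
  rw [List.length_append, List.length_singleton]
  have h1 : p.length + 1 + 1 - K = (p.length + 1 - K) + 1 := by omega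
  rw [h1, List.range_succ, List.map_append, List.map_singleton]
  congr 1
  · apply List.map_congr_left
    intro i hi
    rw [List.mem_range] at hi
    rw [List.drop_append_of_le_length (by omega)]
    rw [List.take_append_of_le_length (by rw [List.length_drop]; omega)]
  · congr 1
    have hlen : ((p ++ [c]).drop (p.length + 1 - K)).length = K := by
      rw [List.length_drop, List.length_append, List.length_singleton]; omega
    exact List.take_of_length_le (le_of_eq hlen)

theorem wnd_snoc_small (K : Nat) (p : List Char) (c : Char) (hK : p.length + 1 < K) :
    wnd K (p ++ [c]) = wnd K p := by
  unfold wnd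
  rw [List.length_append, List.length_singleton]
  rw [show p.length + 1 + 1 - K = 0 from by omega, show p.length + 1 - K = 0 from by omega]
  simp

theorem vsuf_snoc (p : List Char) (c : Char) :
    vsuf (p ++ [c]) = if isACGT c then vsuf p ++ [c] else [] := by
  unfold vsuf
  rw [List.reverse_append, List.reverse_singleton, List.singleton_append, List.takeWhile_cons]
  split
  · rw [List.reverse_cons]
  · rfl

theorem vsuf_suffix (p : List Char) : vsuf p <:+ p := by
  rw [← List.reverse_prefix]
  unfold vsuf
  rw [List.reverse_reverse]
  exact List.takeWhile_prefix _

theorem take_all_iff_takeWhile (K : Nat) (r : List Char) (hK : K ≤ r.length) :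
    ((r.take K).all isACGT = true) ↔ K ≤ (r.takeWhile isACGT).length := by
  induction r generalizing K with
  | nil => simp_all
  | cons c t ih =>
    cases K with
    | zero => simp
    | succ n =>
      rw [List.take_succ_cons, List.all_cons, List.takeWhile_cons]
      cases hc : isACGT c
      · simp [hc]
      · simp only [hc, Bool.true_and, if_true, List.length_cons]
        rw [ih n (by simpa using hK)]
        omega

theorem lastK_valid_iff (K : Nat) (q : List Char) (hK : K ≤ q.length) :
    (validB (q.drop (q.length - K)) = true) ↔ K ≤ (vsuf q).length := by
  have hrev : q.drop (q.length - K) = (q.reverse.take K).reverse := by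
    rw [List.reverse_take]
    · rw [List.reverse_reverse, List.length_reverse]
  rw [hrev]
  unfold validB vsuf
  rw [List.all_reverse, List.length_reverse]
  exact take_all_iff_takeWhile K q.reverse (by rw [List.length_reverse]; exact hK)

theorem drop_suffix_eq (K : Nat) (u v : List Char) (hK : K ≤ v.length) :
    (u ++ v).drop ((u ++ v).length - K) = v.drop (v.length - K) := by
  rw [List.drop_append, List.length_append]
  rw [show u.length + v.length - K - u.length = v.length - K from by omega]
  rw [List.drop_eq_nil_of_le (by omega), List.nil_append]

theorem lastK_eq_drop_vsuf (K : Nat) (q : List Char) (hK : K ≤ (vsuf q).length) :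
    q.drop (q.length - K) = (vsuf q).drop ((vsuf q).length - K) := by
  obtain ⟨u, hu⟩ := vsuf_suffix q
  conv_lhs => rw [← hu]
  exact drop_suffix_eq K u (vsuf q) hK

theorem enc_mod_lastK (K : Nat) (r : List Char) (hK : K ≤ r.length) :
    enc r % 4 ^ K = enc (r.drop (r.length - K)) := by
  have hsplit : r = r.take (r.length - K) ++ r.drop (r.length - K) := (List.take_append_drop _ r).symm
  have hdl : (r.drop (r.length - K)).length = K := by rw [List.length_drop]; omega
  have hlt : enc (r.drop (r.length - K)) < 4 ^ K := by
    have h := enc_lt (r.drop (r.length - K)); rwa [hdl] at h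
  conv_lhs => rw [hsplit]
  rw [enc_append, hdl, Nat.mul_add_mod', Nat.mod_eq_of_lt hlt]

theorem count_map_enc (K j : Nat) (l : List (List Char)) (hj : j < 4 ^ K)
    (hl : ∀ w ∈ l, w.length = K ∧ validB w = true) :
    (l.map enc).count j = l.count (dec K j) := by
  rw [List.count_eq_countP, List.countP_map, List.count_eq_countP]
  apply List.countP_congr
  intro w hw
  obtain ⟨hlen, hval⟩ := hl w hw
  simp only [Function.comp_apply, beq_iff_eq]
  constructor
  · intro h
    have hde := dec_enc w hval
    rw [hlen, h] at hde
    exact hde.symm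
  · intro h
    subst h
    exact enc_dec K j hj

theorem foldl_wnd (s : List Char) (K : Nat)
    (f : PySem.Dict (List Char) Int → List Char → PySem.Dict (List Char) Int)
    (init : PySem.Dict (List Char) Int) :
    (List.range (s.length + 1 - K)).foldl (fun d t => f d ((s.drop t).take K)) init
      = (wnd K s).foldl f init := by
  rw [wnd, List.foldl_map]

theorem a_closed (seq : String) (K : Nat) :
    kmer_composition_biopython seq (K : Int)
      = (List.range (4 ^ K)).map (fun j => (((wnd K seq.toList).filter validB).count (dec K j) : Int)) := by
  unfold kmer_composition_biopython
  simp only [Int.toNat_natCast]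
  -- identify the loop's index list with the Nat range
  have hrange : PySem.List.pyRange 0 ((seq.toList.length : Int) - (K : Int) + 1) 1
      = (List.range (seq.toList.length + 1 - K)).map (fun t => (0 : Int) + (t : Nat)) := by
    rw [PySem.List.pyRange_one]
    congr 2
    omega
  rw [hrange, List.foldl_map]
  -- the loop body applied at index ↑t is the window (seq.toList.drop t).take K
  have hbody : ∀ (d : PySem.Dict (List Char) Int) (t : Nat),
      (fun d (i : Int) =>
        let kmer := PySem.List.slice seq.toList (some i) (some (i + (K : Int)))
        if d.contains kmer then d.modify kmer 0 (· + 1) else d) d ((0 : Int) + (t : Nat))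
      = (fun d x => if d.contains x then d.modify x 0 (· + 1) else d) d ((seq.toList.drop t).take K) := by
    intro d t
    simp only [zero_add, PySem.List.slice_natCast_add]
  simp only [hbody]
  rw [foldl_wnd seq.toList K (fun d x => if d.contains x then d.modify x 0 (· + 1) else d) _]
  -- read off the final dict
  set d0 : PySem.Dict (List Char) Int := (kmerProduct ['A','C','G','T'] K).foldl (fun d w => d.insert w 0) PySem.Dict.empty with hd0
  have hc0 : ∀ v, d0.contains v = (kmerProduct ['A','C','G','T'] K).contains v := by
    intro v; rw [hd0, dict_init_contains]; simp
  have hg0 : ∀ v, d0.getD v 0 = 0 := by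
    intro v; rw [hd0]; exact dict_init_getD _ _ _ (by simp)
  have hmap : (kmerProduct ['A','C','G','T'] K).map
        (fun w => ((wnd K seq.toList).foldl (fun d x => if d.contains x then d.modify x 0 (· + 1) else d) d0).getD w 0)
      = (kmerProduct ['A','C','G','T'] K).map
        (fun w => (((wnd K seq.toList).filter validB).count w : Int)) := by
    apply List.map_congr_left
    intro w hw
    have hcw : d0.contains w = true := by
      rw [hc0 w]; simp only [List.contains_iff_mem]; exact hw
    rw [(dict_count_loop (wnd K seq.toList) d0 w).2 hcw, hg0 w, zero_add]
    congr 2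
    apply List.filter_congr
    intro x hx
    have hlen := wnd_length_mem K seq.toList x hx
    rw [hc0 x]
    cases hv : validB x
    · simp [List.contains_iff_mem, mem_kmerProduct, hlen, hv]
    · simp [List.contains_iff_mem, mem_kmerProduct, hlen, hv]
  rw [hmap, kmerProduct_eq, List.map_map]
  rfl

theorem enc_snoc (u : List Char) (c : Char) : enc (u ++ [c]) = enc u * 4 + cval c := by
  rw [enc_append]
  simp [enc]

theorem codeB_some (ch : Char) (c : Nat) (h : codeB ch = some c) :
    cval ch = c ∧ isACGT ch = true := by
  unfold cval isACGT
  rw [h]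
  simp

theorem b_inv (K : Nat) (hK : 1 ≤ K) (p : List Char) :
    (∀ j : Nat,
      (p.foldl (fun (st : PySem.Dict Nat Int × Nat × Nat) (ch : Char) =>
        match codeB ch with
        | none => (st.1, 0, 0)
        | some c =>
          let idx := (st.2.1 % 4 ^ (K - 1)) * 4 + c
          let run := st.2.2 + 1
          if K ≤ run then (st.1.insert idx (st.1.getD idx 0 + 1), idx, run) else (st.1, idx, run))
        (PySem.Dict.empty, 0, 0)).1.getD j 0
      = ((((wnd K p).filter validB).map enc).count j : Int)) ∧
    (p.foldl (fun (st : PySem.Dict Nat Int × Nat × Nat) (ch : Char) =>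
        match codeB ch with
        | none => (st.1, 0, 0)
        | some c =>
          let idx := (st.2.1 % 4 ^ (K - 1)) * 4 + c
          let run := st.2.2 + 1
          if K ≤ run then (st.1.insert idx (st.1.getD idx 0 + 1), idx, run) else (st.1, idx, run))
        (PySem.Dict.empty, 0, 0)).2
      = (enc (vsuf p) % 4 ^ K, (vsuf p).length) := by
  induction p using List.reverseRecOn with
  | nil =>
    refine ⟨?_, ?_⟩
    · intro j
      show (PySem.Dict.empty : PySem.Dict Nat Int).getD j 0 = _
      have hw : wnd K ([] : List Char) = [] := by
        unfold wnd
        rw [show ([] : List Char).length + 1 - K = 0 from by simp only [List.length_nil]; omega]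
        rfl
      rw [hw]
      simp
    · show (0, 0) = (enc (vsuf []) % 4 ^ K, (vsuf []).length)
      simp [vsuf, enc]
  | append_singleton p ch ih =>
    rw [List.foldl_append, List.foldl_cons, List.foldl_nil]
    obtain ⟨ihd, ihs⟩ := ih
    have hrun_le : (vsuf p).length ≤ p.length := (vsuf_suffix p).length_le
    -- name the state after p
    set st := p.foldl (fun (st : PySem.Dict Nat Int × Nat × Nat) (ch : Char) =>
        match codeB ch with
        | none => (st.1, 0, 0)
        | some c =>
          let idx := (st.2.1 % 4 ^ (K - 1)) * 4 + c
          let run := st.2.2 + 1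
          if K ≤ run then (st.1.insert idx (st.1.getD idx 0 + 1), idx, run) else (st.1, idx, run))
        (PySem.Dict.empty, 0, 0) with hst
    have hidx2 : st.2.1 = enc (vsuf p) % 4 ^ K := by rw [ihs]
    have hrun2 : st.2.2 = (vsuf p).length := by rw [ihs]
    cases hcb : codeB ch with
    | none =>
      have hac : isACGT ch = false := by unfold isACGT; rw [hcb]; rfl
      simp only [hcb]
      refine ⟨?_, ?_⟩
      · intro j
        rw [ihd j]
        congr 2
        by_cases hKp : K ≤ p.length + 1
        · have hvs0 : vsuf (p ++ [ch]) = [] := by rw [vsuf_snoc, hac]; simp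
          have hlen2 : p.length + 1 - K = (p ++ [ch]).length - K := by simp
          have hval : validB ((p ++ [ch]).drop ((p ++ [ch]).length - K)) = false := by
            cases hv : validB ((p ++ [ch]).drop ((p ++ [ch]).length - K))
            · rfl
            · exfalso
              have h2 := (lastK_valid_iff K (p ++ [ch]) (by simp; omega)).mp hv
              rw [hvs0] at h2
              simp at h2
              omega
          rw [wnd_snoc K p ch hKp, List.filter_append, List.filter_singleton, hlen2, hval]
          simp
        · rw [wnd_snoc_small K p ch (by omega)]
      · show ((0 : Nat), (0 : Nat)) = _
        rw [vsuf_snoc, hac]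
        simp [enc]
    | some c =>
      obtain ⟨hcv, hac⟩ := codeB_some ch c hcb
      have hvs : vsuf (p ++ [ch]) = vsuf p ++ [ch] := by rw [vsuf_snoc, hac]; rfl
      have hidx : (st.2.1 % 4 ^ (K - 1)) * 4 + c = enc (vsuf (p ++ [ch])) % 4 ^ K := by
        rw [hidx2, hvs, enc_snoc, hcv]
        exact mod_step K (enc (vsuf p)) c hK (hcv ▸ cval_lt_four ch)
      have hrun : (vsuf (p ++ [ch])).length = (vsuf p).length + 1 := by
        rw [hvs, List.length_append, List.length_singleton]
      simp only [hcb]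
      by_cases hKr : K ≤ st.2.2 + 1
      · rw [if_pos hKr]
        rw [hrun2] at hKr
        refine ⟨?_, ?_⟩
        · intro j
          -- the new window is valid and encodes to the new index
          have hKp : K ≤ p.length + 1 := by omega
          have hq : K ≤ (p ++ [ch]).length := by simp; omega
          have hKvs : K ≤ (vsuf (p ++ [ch])).length := by omega
          have hwin : (p ++ [ch]).drop (p.length + 1 - K)
              = (vsuf (p ++ [ch])).drop ((vsuf (p ++ [ch])).length - K) := by
            have := lastK_eq_drop_vsuf K (p ++ [ch]) hKvs
            simpa using this
          have hvalid : validB ((p ++ [ch]).drop (p.length + 1 - K)) = true := by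
            have h := (lastK_valid_iff K (p ++ [ch]) hq).mpr hKvs
            simpa using h
          have hencw : enc ((p ++ [ch]).drop (p.length + 1 - K)) = enc (vsuf (p ++ [ch])) % 4 ^ K := by
            rw [hwin, ← enc_mod_lastK K (vsuf (p ++ [ch])) hKvs]
          show (st.1.insert ((st.2.1 % 4 ^ (K - 1)) * 4 + c) (st.1.getD ((st.2.1 % 4 ^ (K - 1)) * 4 + c) 0 + 1)).getD j 0 = _
          rw [PySem.Dict.getD_insert]
          rw [wnd_snoc K p ch hKp, List.filter_append, List.filter_singleton, hvalid,
              Bool.cond_true, List.map_append, List.map_singleton]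
          rw [List.count_append, List.count_singleton, hencw]
          rw [ihd j, ihd ((st.2.1 % 4 ^ (K - 1)) * 4 + c), hidx]
          by_cases hje : j = enc (vsuf (p ++ [ch])) % 4 ^ K
          · rw [if_pos hje, hje]
            simp
          · rw [if_neg hje]
            have : (enc (vsuf (p ++ [ch])) % 4 ^ K == j) = false := by
              simp [Ne.symm hje]
            rw [this]
            simp
        · show ((st.2.1 % 4 ^ (K - 1)) * 4 + c, st.2.2 + 1) = _
          rw [hidx, hrun2, hrun]
      · rw [if_neg hKr]
        rw [hrun2] at hKr
        refine ⟨?_, ?_⟩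
        · intro j
          rw [ihd j]
          congr 2
          by_cases hKp : K ≤ p.length + 1
          · have hlen2 : p.length + 1 - K = (p ++ [ch]).length - K := by simp
            have hval : validB ((p ++ [ch]).drop ((p ++ [ch]).length - K)) = false := by
              cases hv : validB ((p ++ [ch]).drop ((p ++ [ch]).length - K))
              · rfl
              · exfalso
                have h2 := (lastK_valid_iff K (p ++ [ch]) (by simp; omega)).mp hv
                rw [hrun] at h2
                omega
            rw [wnd_snoc K p ch hKp, List.filter_append, List.filter_singleton, hlen2, hval]
            simp
          · rw [wnd_snoc_small K p ch (by omega)]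
        · show ((st.2.1 % 4 ^ (K - 1)) * 4 + c, st.2.2 + 1) = _
          rw [hidx, hrun2, hrun]

-- ===== VERDICT (by name: the statement is the Claim_ definition above) =====
theorem kmer_composition_biopython_spec : Claim_equal_kmer_composition_biopython := by
  intro seq k hdom hpre
  unfold Spec_kmer_composition_biopython
  obtain ⟨K, rfl⟩ : ∃ K : Nat, k = (K : Int) := ⟨k.toNat, (Int.toNat_of_nonneg hpre).symm⟩
  rw [a_closed seq K]
  unfold kmer_composition_biopython_alt
  by_cases hK0 : (K : Int) = 0
  · rw [if_pos hK0]
    have hK0' : K = 0 := by exact_mod_cast hK0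
    subst hK0'
    have hw : wnd 0 seq.toList = List.replicate (seq.toList.length + 1) [] := by
      unfold wnd
      rw [Nat.sub_zero]
      simp [List.map_const']
    rw [hw]
    have hrep : (List.replicate (seq.toList.length + 1) ([] : List Char)).filter validB
        = List.replicate (seq.toList.length + 1) [] := by
      rw [List.filter_replicate]
      simp [validB]
    rw [hrep]
    show List.map _ (List.range 1) = _
    rw [List.range_one, List.map_singleton]
    show [(List.count (dec 0 0) (List.replicate (seq.toList.length + 1) []) : Int)] = _
    rw [show dec 0 0 = [] from rfl, List.count_replicate_self]
    push_cast
    rfl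
  · rw [if_neg hK0]
    have hK : 1 ≤ K := by
      rcases Nat.eq_zero_or_pos K with h | h
      · exact absurd (by exact_mod_cast congrArg (Nat.cast : Nat → Int) h) hK0
      · exact h
    simp only [Int.toNat_natCast]
    apply List.map_congr_left
    intro j hj
    rw [List.mem_range] at hj
    rw [(b_inv K hK seq.toList).1 j]
    congr 1
    rw [count_map_enc K j _ hj]
    intro w hw
    exact ⟨wnd_length_mem K seq.toList w (List.mem_of_mem_filter hw), List.of_mem_filter hw⟩
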